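-- pv_equiv track=rewrite | github.com/WilliamSmithEdward/mudproto | mudproto-server/server.py | _split_actor_round_lines
-- ===== SOURCE A (Python) =====
-- def _line_text(line: list[dict]) -> str:
--     return "".join(str(part.get("text", "")) for part in line if isinstance(part, dict))
--
-- def _split_actor_round_lines(lines: list[list[dict]], actor_prefix: str) -> tuple[list[list[dict]], list[list[dict]]]:
--     player_lines: list[list[dict]] = []
--     retaliation_lines: list[list[dict]] = []
--     in_retaliation = False
--     normalized_prefix = actor_prefix.strip().lower()
--
--     for line in lines:
--         line_text = _line_text(line)
--         if not line_text.strip():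
--             if in_retaliation:
--                 retaliation_lines.append([])
--             else:
--                 player_lines.append([])
--             continue
--
--         normalized_line = line_text.strip().lower()
--         is_actor_line = normalized_line.startswith(normalized_prefix)
--         if not in_retaliation and is_actor_line:
--             player_lines.append(line)
--             continue
--
--         in_retaliation = True
--         retaliation_lines.append(line)
--
--     return player_lines, retaliation_lines
-- ===== SOURCE B (Python) =====
-- def _line_text(line: list[dict]) -> str:
--     return "".join(str(part.get("text", "")) for part in line if isinstance(part, dict))
--
-- def _split_actor_round_lines(lines: list[list[dict]], actor_prefix: str) -> tuple[list[list[dict]], list[list[dict]]]: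
--     normalized_prefix = actor_prefix.strip().lower()
--
--     def _is_break(line: list[dict]) -> bool:
--         text = _line_text(line).strip()
--         return bool(text) and not text.lower().startswith(normalized_prefix)
--
--     split = next((i for i, line in enumerate(lines) if _is_break(line)), len(lines))
--     player_lines = [line if _line_text(line).strip() else [] for line in lines[:split]]
--     retaliation_lines = [line if _line_text(line).strip() else [] for line in lines[split:]]
--     return player_lines, retaliation_lines
-- ===== Notes on version B (the rewrite author's own statement) =====
-- stated objective: simpler
-- what changed: Replaces A's single stateful loop with a boolean mode flag by first computing the split boundary (index of the first non-blank line not starting with the normalized prefix) and then mapping the blank-to-[] normalization over the two slices.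
import Mathlib
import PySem

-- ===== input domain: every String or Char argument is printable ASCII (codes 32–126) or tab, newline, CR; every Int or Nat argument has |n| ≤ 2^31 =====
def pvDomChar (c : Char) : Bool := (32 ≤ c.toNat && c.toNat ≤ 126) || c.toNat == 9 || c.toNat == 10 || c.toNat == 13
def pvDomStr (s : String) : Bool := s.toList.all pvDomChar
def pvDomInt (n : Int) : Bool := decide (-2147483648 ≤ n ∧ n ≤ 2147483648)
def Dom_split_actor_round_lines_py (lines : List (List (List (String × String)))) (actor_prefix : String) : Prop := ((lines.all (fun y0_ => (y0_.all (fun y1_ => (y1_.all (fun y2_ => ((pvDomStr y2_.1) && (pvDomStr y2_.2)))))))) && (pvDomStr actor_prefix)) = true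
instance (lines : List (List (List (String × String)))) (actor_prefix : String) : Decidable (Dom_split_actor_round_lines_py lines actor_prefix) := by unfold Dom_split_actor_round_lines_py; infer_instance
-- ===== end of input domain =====

-- B replaces A's stateful loop (mode flag) by: find the split boundary first, then map the
-- blank-line normalization over the two slices (objective: simpler decomposition).

-- ===== PORT A =====
-- _line_text: "".join(str(part.get("text", "")) for part in line)  (every part is a dict here)
def pvLineText (line : List (List (String × String))) : String :=
  PySem.Str.join "" (line.map (fun part => PySem.Dict.getD (PySem.Dict.mk part) "text" ""))

-- the body of A's for-loop, one step on the state (player_lines, retaliation_lines, in_retaliation)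
def pvStep (np : String) (st : List (List (List (String × String))) × List (List (List (String × String))) × Bool) (line : List (List (String × String))) : List (List (List (String × String))) × List (List (List (String × String))) × Bool :=
  let pl := st.1; let rl := st.2.1; let inR := st.2.2
  let line_text := pvLineText line
  if PySem.Str.strip line_text == "" then
    if inR then (pl, rl ++ [([] : List (List (String × String)))], inR)
    else (pl ++ [([] : List (List (String × String)))], rl, inR)
  else
    let normalized_line := PySem.Str.lower (PySem.Str.strip line_text)
    let is_actor_line := PySem.Str.startswith normalized_line np
    if !inR && is_actor_line then (pl ++ [line], rl, inR)
    else (pl, rl ++ [line], true)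

def split_actor_round_lines_py (lines : List (List (List (String × String)))) (actor_prefix : String) : (List (List (List (String × String)))) × (List (List (List (String × String)))) :=
  let normalized_prefix := PySem.Str.lower (PySem.Str.strip actor_prefix)
  let res := lines.foldl (pvStep normalized_prefix)
    (([], [], false) : List (List (List (String × String))) × List (List (List (String × String))) × Bool)
  (res.1, res.2.1)

-- ===== PORT B =====
def pvIsBreak (normalized_prefix : String) (line : List (List (String × String))) : Bool :=
  let text := PySem.Str.strip (pvLineText line)
  !(text == "") && !(PySem.Str.startswith (PySem.Str.lower text) normalized_prefix)

def pvBlankToNil (line : List (List (String × String))) : List (List (String × String)) :=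
  if PySem.Str.strip (pvLineText line) == "" then [] else line

def split_actor_round_lines_py_alt (lines : List (List (List (String × String)))) (actor_prefix : String) : (List (List (List (String × String)))) × (List (List (List (String × String)))) :=
  let normalized_prefix := PySem.Str.lower (PySem.Str.strip actor_prefix)
  let split := lines.findIdx (pvIsBreak normalized_prefix)
  ((lines.take split).map pvBlankToNil, (lines.drop split).map pvBlankToNil)

-- ===== PRECONDITION & SPEC =====
def Spec_split_actor_round_lines_py (lines : List (List (List (String × String)))) (actor_prefix : String) (out : (List (List (List (String × String)))) × (List (List (List (String × String))))) : Prop := out = split_actor_round_lines_py_alt lines actor_prefix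
instance (lines : List (List (List (String × String)))) (actor_prefix : String) (out : (List (List (List (String × String)))) × (List (List (List (String × String))))) : Decidable (Spec_split_actor_round_lines_py lines actor_prefix out) := by unfold Spec_split_actor_round_lines_py; infer_instance

-- ===== CLAIM (what is proved, stated in full; the proofs are below) =====
def Claim_equal_split_actor_round_lines_py : Prop := ∀ (lines : List (List (List (String × String)))) (actor_prefix : String), Dom_split_actor_round_lines_py lines actor_prefix → Spec_split_actor_round_lines_py lines actor_prefix (split_actor_round_lines_py lines actor_prefix)

-- ===== LEMMAS AND PROOFS =====

lemma pvFoldl_true (np : String) (xs : List (List (List (String × String)))) (pl rl : List (List (List (String × String)))) :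
    xs.foldl (pvStep np) (pl, rl, true) = (pl, rl ++ xs.map pvBlankToNil, true) := by
  induction xs generalizing rl with
  | nil => simp
  | cons x xs ih =>
    simp only [List.foldl_cons, List.map_cons]
    by_cases hb : PySem.Str.strip (pvLineText x) = ""
    · simp [pvStep, hb, ih, pvBlankToNil]
    · simp [pvStep, hb, ih, pvBlankToNil]

lemma pvFoldl_false (np : String) (xs : List (List (List (String × String)))) (pl rl : List (List (List (String × String)))) :
    xs.foldl (pvStep np) (pl, rl, false) =
      (pl ++ (xs.take (xs.findIdx (pvIsBreak np))).map pvBlankToNil,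
       rl ++ (xs.drop (xs.findIdx (pvIsBreak np))).map pvBlankToNil,
       xs.any (pvIsBreak np)) := by
  induction xs generalizing pl with
  | nil => simp
  | cons x xs ih =>
    simp only [List.foldl_cons, List.findIdx_cons, List.any_cons]
    by_cases hb : PySem.Str.strip (pvLineText x) = ""
    · -- blank line: pred is false, stays in player mode, appends []
      have hp : pvIsBreak np x = false := by simp [pvIsBreak, hb]
      simp [pvStep, hb, hp, ih, pvBlankToNil]
    · by_cases hs : PySem.Chars.startswith (PySem.Chars.lower (PySem.Chars.strip (pvLineText x).toList)) np.toList = true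
      · -- actor line: pred false, appended to player_lines
        have hp : pvIsBreak np x = false := by simp [pvIsBreak, hs]
        simp [pvStep, hb, hs, hp, ih, pvBlankToNil]
      · -- first break line: A switches to retaliation mode for good
        have hp : pvIsBreak np x = true := by
          simp [pvIsBreak, hb]; simpa using hs
        simp [pvStep, hb, hs, hp, pvFoldl_true, pvBlankToNil]

-- ===== VERDICT (by name: the statement is the Claim_ definition above) =====
theorem split_actor_round_lines_py_spec : Claim_equal_split_actor_round_lines_py := by
  intro lines actor_prefix _
  unfold Spec_split_actor_round_lines_py split_actor_round_lines_py split_actor_round_lines_py_alt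
  simp only [pvFoldl_false, List.map_take, List.map_drop, List.nil_append]
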